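-- pv_equiv track=rewrite | github.com/wyk18703232953/myResearch | codeComplex/demo1/onlyCode/results/logn/results_python_logn_0150/generated_python_logn_0150.py | bs_sum
-- ===== SOURCE A (Python) =====
-- def normal_sum(N):
--     return (N ** 2 + N) // 2
--
-- def seg_sum(i, j):
--     # 原函数名为 sum，避免覆盖内置函数，这里改名为 seg_sum
--     return normal_sum(j) - 1 - (normal_sum(i - 1) - 1)
--
-- def bs_sum(start, end, k, n):
--     # 二分搜索
--     if start > end:
--         # 按原逻辑不太会走到这里，这里给一个兜底返回
--         return 0
--     mid = (start + end) // 2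
--
--     remain = n - seg_sum(mid, k)
--     if remain >= mid:
--         return bs_sum(start, mid - 1, k, n)
--     if remain < 0:
--         return bs_sum(mid + 1, end, k, n)
--
--     return k - mid + 2 if remain != 0 else k - mid + 1
-- ===== SOURCE B (Python) =====
-- def bs_sum(start, end, k, n):
--     # Iterative binary search; triangular sums inlined, the k-part hoisted out of the loop.
--     base = n - k * (k + 1) // 2
--     lo, hi = start, end
--     while lo <= hi:
--         mid = (lo + hi) // 2
--         remain = base + mid * (mid - 1) // 2
--         if remain >= mid:
--             hi = mid - 1
--         elif remain < 0:
--             lo = mid + 1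
--         else:
--             return k - mid + (1 if remain == 0 else 2)
--     return 0
-- ===== Notes on version B (the rewrite author's own statement) =====
-- stated objective: simpler
-- what changed: Replaced the recursive binary search with helper functions normal_sum/seg_sum by a single iterative while-loop with the triangular-number arithmetic inlined and the k-dependent part hoisted out of the loop.
import Mathlib
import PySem

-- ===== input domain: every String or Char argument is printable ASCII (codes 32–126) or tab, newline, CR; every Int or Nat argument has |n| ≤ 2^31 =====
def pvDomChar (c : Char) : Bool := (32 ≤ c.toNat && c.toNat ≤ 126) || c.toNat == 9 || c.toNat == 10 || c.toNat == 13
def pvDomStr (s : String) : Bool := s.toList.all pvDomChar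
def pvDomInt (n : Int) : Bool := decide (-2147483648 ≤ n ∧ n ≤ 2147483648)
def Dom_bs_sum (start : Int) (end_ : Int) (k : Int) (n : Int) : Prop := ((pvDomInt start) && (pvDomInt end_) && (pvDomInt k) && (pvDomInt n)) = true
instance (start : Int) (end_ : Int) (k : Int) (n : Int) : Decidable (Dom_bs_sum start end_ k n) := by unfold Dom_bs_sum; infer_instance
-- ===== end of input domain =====

-- B replaces the recursive search (with its normal_sum/seg_sum helper chain) by one
-- iterative loop with the triangular-number arithmetic inlined; same results, simpler code.
-- Both ports carry a fuel argument (= window size) that only makes the recursion structural: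
-- when it reaches 0 the window is already empty, so the 0-branch returns 0 exactly as Python does.

-- ===== PORT A =====
def pv_normal_sum (N : Int) : Int := PySem.Int.floordiv (N ^ 2 + N) 2

def pv_seg_sum (i : Int) (j : Int) : Int := pv_normal_sum j - 1 - (pv_normal_sum (i - 1) - 1)

def pv_bsA : Nat → Int → Int → Int → Int → Int
  | 0, _, _, _, _ => 0
  | fuel + 1, start, end_, k, n =>
    if start > end_ then 0
    else
      let mid := PySem.Int.floordiv (start + end_) 2
      let remain := n - pv_seg_sum mid k
      if remain ≥ mid then pv_bsA fuel start (mid - 1) k n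
      else if remain < 0 then pv_bsA fuel (mid + 1) end_ k n
      else if remain ≠ 0 then k - mid + 2 else k - mid + 1

def bs_sum (start : Int) (end_ : Int) (k : Int) (n : Int) : Int :=
  pv_bsA (end_ + 1 - start).toNat start end_ k n

-- ===== PORT B =====
def pv_bsLoop : Nat → Int → Int → Int → Int → Int
  | 0, _, _, _, _ => 0
  | fuel + 1, base, k, lo, hi =>
    if lo > hi then 0
    else
      let mid := PySem.Int.floordiv (lo + hi) 2
      let remain := base + PySem.Int.floordiv (mid * (mid - 1)) 2
      if remain ≥ mid then pv_bsLoop fuel base k lo (mid - 1)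
      else if remain < 0 then pv_bsLoop fuel base k (mid + 1) hi
      else k - mid + (if remain == 0 then 1 else 2)

def bs_sum_alt (start : Int) (end_ : Int) (k : Int) (n : Int) : Int :=
  pv_bsLoop (end_ + 1 - start).toNat (n - PySem.Int.floordiv (k * (k + 1)) 2) k start end_

-- ===== PRECONDITION & SPEC =====
def Spec_bs_sum (start : Int) (end_ : Int) (k : Int) (n : Int) (out : Int) : Prop := out = bs_sum_alt start end_ k n
instance (start : Int) (end_ : Int) (k : Int) (n : Int) (out : Int) : Decidable (Spec_bs_sum start end_ k n out) := by unfold Spec_bs_sum; infer_instance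

-- ===== CLAIM (what is proved, stated in full; the proofs are below) =====
def Claim_equal_bs_sum : Prop := ∀ (start : Int) (end_ : Int) (k : Int) (n : Int), Dom_bs_sum start end_ k n → Spec_bs_sum start end_ k n (bs_sum start end_ k n)

-- ===== LEMMAS AND PROOFS =====

-- the two "remain" computations coincide (same triangular products, no parity reasoning needed)
theorem pv_rem_eq (n k m : Int) :
    (n - PySem.Int.floordiv (k * (k + 1)) 2) + PySem.Int.floordiv (m * (m - 1)) 2
      = n - pv_seg_sum m k := by
  unfold pv_seg_sum pv_normal_sum
  have h1 : k ^ 2 + k = k * (k + 1) := by ring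
  have h2 : (m - 1) ^ 2 + (m - 1) = m * (m - 1) := by ring
  rw [h1, h2]
  ring

theorem pv_loop_eq (k n : Int) : ∀ (fuel : Nat) (lo hi : Int),
    pv_bsLoop fuel (n - PySem.Int.floordiv (k * (k + 1)) 2) k lo hi = pv_bsA fuel lo hi k n := by
  intro fuel
  induction fuel with
  | zero => intro lo hi; rfl
  | succ f ih =>
    intro lo hi
    show (if lo > hi then 0 else _) = (if lo > hi then 0 else _)
    by_cases hle : lo > hi
    · simp only [hle, if_true]
    · simp only [hle, if_false]
      set mid := PySem.Int.floordiv (lo + hi) 2 with hmiddef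
      rw [pv_rem_eq n k mid]
      set remain := n - pv_seg_sum mid k with hremdef
      by_cases h1 : remain ≥ mid
      · simp only [h1, if_true]; exact ih lo (mid - 1)
      · simp only [h1, if_false]
        by_cases h2 : remain < 0
        · simp only [h2, if_true]; exact ih (mid + 1) hi
        · simp only [h2, if_false]
          by_cases h3 : remain = 0 <;> simp [h3]

-- ===== VERDICT (by name: the statement is the Claim_ definition above) =====
theorem bs_sum_spec : Claim_equal_bs_sum := by
  intro start end_ k n _
  unfold Spec_bs_sum bs_sum_alt bs_sum
  exact (pv_loop_eq k n (end_ + 1 - start).toNat start end_).symm
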